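-- pv_equiv track=rewrite | github.com/YiseBoge/CompetitiveProgramming | LeetCode/Sorting/car_fleet.py | __sort_by_another__
-- ===== SOURCE A (Python) =====
-- def __sort_by_another__(list1, list2):
--     items = {}
--     length = len(list1)
--     results = []
--
--     for i in range(length):
--         if items.get(list1[i]) is None:
--             items[list1[i]] = [list2[i]]
--         else:
--             items[list1[i]].append(list2[i])
--     for j in sorted(list(items)):
--         results += items[j]
--
--     return results
-- ===== SOURCE B (Python) =====
-- def __sort_by_another__(list1, list2):
--     pairs = [(list1[i], list2[i]) for i in range(len(list1))]
--     pairs.sort(key=lambda p: p[0])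
--     return [p[1] for p in pairs]
-- ===== Notes on version B (the rewrite author's own statement) =====
-- stated objective: simpler
-- what changed: Replaces the grouping dict plus separate key-sort-and-concatenate with one stable sort of (key, value) pairs on the key alone, whose tie stability reproduces the per-key grouping order.
import Mathlib
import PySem

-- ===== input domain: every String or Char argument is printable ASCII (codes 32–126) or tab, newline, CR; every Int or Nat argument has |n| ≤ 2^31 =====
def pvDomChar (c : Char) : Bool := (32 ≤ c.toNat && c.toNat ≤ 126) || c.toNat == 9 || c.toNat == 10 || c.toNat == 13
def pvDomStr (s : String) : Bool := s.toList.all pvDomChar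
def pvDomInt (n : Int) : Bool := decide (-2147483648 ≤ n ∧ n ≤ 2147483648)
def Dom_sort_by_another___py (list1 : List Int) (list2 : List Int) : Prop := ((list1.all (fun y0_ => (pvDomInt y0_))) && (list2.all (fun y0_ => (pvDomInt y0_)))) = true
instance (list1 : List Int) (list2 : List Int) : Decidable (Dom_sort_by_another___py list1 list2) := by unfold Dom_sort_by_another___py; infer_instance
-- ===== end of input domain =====

-- B replaces A's grouping dict + key sort + concatenation by ONE stable sort of the
-- (key, value) pairs on the key alone (objective: simpler; equal return values on Pre_).

-- ===== PORT A =====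
-- pyGetD with default 0 is exact here: every index i of range(len(list1)) is in range
-- for list1, and in range for list2 by Pre_ (Python raises IndexError otherwise).
def sort_by_another___py (list1 : List Int) (list2 : List Int) : List Int :=
  let length : Int := list1.length
  let items : PySem.Dict Int (List Int) :=
    (PySem.List.pyRange 0 length).foldl (fun items i =>
      match items.get? (PySem.List.pyGetD list1 i 0) with
      | none   => items.insert (PySem.List.pyGetD list1 i 0) [PySem.List.pyGetD list2 i 0]
      | some v => items.insert (PySem.List.pyGetD list1 i 0) (v ++ [PySem.List.pyGetD list2 i 0]))
      PySem.Dict.empty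
  let results : List Int :=
    (PySem.List.sorted items.keys (fun x => x) false).foldl
      (fun results j => results ++ items.getD j []) []
  results

-- ===== PORT B =====
def sort_by_another___py_alt (list1 : List Int) (list2 : List Int) : List Int :=
  let pairs : List (Int × Int) :=
    (PySem.List.pyRange 0 (list1.length : Int)).map
      (fun i => (PySem.List.pyGetD list1 i 0, PySem.List.pyGetD list2 i 0))
  (PySem.List.sorted pairs (fun p => p.1) false).map (fun p => p.2)

-- ===== PRECONDITION & SPEC =====
-- Pre_ excludes exactly the inputs where Python A raises IndexError (list2 shorter than
-- list1, so list2[i] is out of range); Python B raises there as well.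
def Pre_sort_by_another___py (list1 : List Int) (list2 : List Int) : Prop :=
  list1.length ≤ list2.length
instance (list1 : List Int) (list2 : List Int) : Decidable (Pre_sort_by_another___py list1 list2) := by unfold Pre_sort_by_another___py; infer_instance
def pvWitness_sort_by_another___py : List Int × List Int := ([3, 1, 3, 1], [10, 20, 30, 40])

def Spec_sort_by_another___py (list1 : List Int) (list2 : List Int) (out : List Int) : Prop := out = sort_by_another___py_alt list1 list2
instance (list1 : List Int) (list2 : List Int) (out : List Int) : Decidable (Spec_sort_by_another___py list1 list2 out) := by unfold Spec_sort_by_another___py; infer_instance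

-- ===== CLAIM (what is proved, stated in full; the proofs are below) =====
def Claim_equal_sort_by_another___py : Prop := ∀ (list1 : List Int) (list2 : List Int), Dom_sort_by_another___py list1 list2 → Pre_sort_by_another___py list1 list2 → Spec_sort_by_another___py list1 list2 (sort_by_another___py list1 list2)

-- ===== LEMMAS AND PROOFS =====

-- A's dict-building loop body, over a (key, value) pair.
def pvStep (d : PySem.Dict Int (List Int)) (p : Int × Int) : PySem.Dict Int (List Int) :=
  match d.get? p.1 with
  | none   => d.insert p.1 [p.2]
  | some v => d.insert p.1 (v ++ [p.2])

def pvGroup (ps : List (Int × Int)) : PySem.Dict Int (List Int) :=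
  ps.foldl pvStep PySem.Dict.empty

-- insertBy passes over a prefix it does not insert into
theorem pv_insertBy_append_left {α : Type} (before : α → α → Bool) (x : α) (l1 l2 : List α)
    (h : ∀ y ∈ l1, before x y = false) :
    PySem.List.insertBy before x (l1 ++ l2) = l1 ++ PySem.List.insertBy before x l2 := by
  induction l1 with
  | nil => simp
  | cons a t ih =>
    simp only [List.cons_append, PySem.List.insertBy, h a (by simp)]
    simp [ih (fun y hy => h y (by simp [hy]))]

-- insertBy puts x in front when x precedes everything
theorem pv_insertBy_all_true {α : Type} (before : α → α → Bool) (x : α) (l : List α)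
    (h : ∀ y ∈ l, before x y = true) :
    PySem.List.insertBy before x l = x :: l := by
  cases l with
  | nil => rfl
  | cons a t => simp [PySem.List.insertBy, h a (by simp)]

-- sorted of a snoc is an insertion into sorted
theorem pv_sorted_snoc {α κ : Type} [LT κ] [DecidableLT κ] (l : List α) (x : α) (key : α → κ) :
    PySem.List.sorted (l ++ [x]) key false
      = PySem.List.insertBy (fun a b => decide (key a < key b)) x (PySem.List.sorted l key false) := by
  rw [PySem.List.sorted_eq_foldl_insertBy, PySem.List.sorted_eq_foldl_insertBy, List.foldl_append]
  rfl

theorem pv_ofList_snoc (l : List Int) (c : Int) :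
    PySem.Set.ofList (l ++ [c]) = PySem.Set.add (PySem.Set.ofList l) c := by
  rw [PySem.Set.ofList_eq_foldl, PySem.Set.ofList_eq_foldl, List.foldl_append]
  rfl

-- inserting a pair whose key is already among the (strictly increasing) keys K
theorem pv_insA (ps : List (Int × Int)) (x : Int × Int) :
    ∀ (K : List Int), K.Pairwise (· < ·) → x.1 ∈ K →
    PySem.List.insertBy (fun a b => decide ((fun p : Int × Int => p.1) a < (fun p : Int × Int => p.1) b)) x
        (K.flatMap (fun j => ps.filter (fun p => p.1 == j)))
      = K.flatMap (fun j => (ps ++ [x]).filter (fun p => p.1 == j)) := by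
  intro K
  induction K with
  | nil => intro _ h; simp at h
  | cons j K ih =>
    intro hpw hmem
    have hj : ∀ j' ∈ K, j < j' := (List.pairwise_cons.mp hpw).1
    have hpw' : K.Pairwise (· < ·) := (List.pairwise_cons.mp hpw).2
    simp only [List.flatMap_cons]
    by_cases hcj : x.1 = j
    · have h1 : ∀ y ∈ ps.filter (fun p => p.1 == j),
          (fun a b : Int × Int => decide (a.1 < b.1)) x y = false := by
        intro y hy
        have : y.1 = j := by simpa using (List.mem_filter.mp hy).2
        simp [this, hcj]
      rw [pv_insertBy_append_left _ _ _ _ h1]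
      have h2 : ∀ y ∈ K.flatMap (fun j' => ps.filter (fun p => p.1 == j')),
          (fun a b : Int × Int => decide (a.1 < b.1)) x y = true := by
        intro y hy
        obtain ⟨j', hj', hyf⟩ := List.mem_flatMap.mp hy
        have hy1 : y.1 = j' := by simpa using (List.mem_filter.mp hyf).2
        simp only [decide_eq_true_eq, hy1, hcj]
        exact hj _ hj'
      rw [pv_insertBy_all_true _ _ _ h2]
      have h3 : K.flatMap (fun j' => (ps ++ [x]).filter (fun p => p.1 == j'))
          = K.flatMap (fun j' => ps.filter (fun p => p.1 == j')) := by
        apply List.flatMap_congr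
        intro j' hj'
        have : x.1 ≠ j' := by
          intro hx; exact absurd (hx ▸ hj _ hj') (by simp [hcj])
        simp [List.filter_append, this]
      rw [h3, List.filter_append]
      simp [hcj]
    · have hmem' : x.1 ∈ K := by
        rcases List.mem_cons.mp hmem with h | h
        · exact absurd h hcj
        · exact h
      have hlt : j < x.1 := hj _ hmem'
      have h1 : ∀ y ∈ ps.filter (fun p => p.1 == j),
          (fun a b : Int × Int => decide (a.1 < b.1)) x y = false := by
        intro y hy
        have : y.1 = j := by simpa using (List.mem_filter.mp hy).2
        simp [this]; omega
      rw [pv_insertBy_append_left _ _ _ _ h1, ih hpw' hmem']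
      have : (ps ++ [x]).filter (fun p => p.1 == j) = ps.filter (fun p => p.1 == j) := by
        have : x.1 ≠ j := hcj
        simp [List.filter_append, this]
      rw [this]

-- inserting a pair with a NEW key: the key list gains the key at its sorted position
theorem pv_insB (ps : List (Int × Int)) (x : Int × Int) :
    ∀ (K : List Int), K.Pairwise (· < ·) → x.1 ∉ K →
    ps.filter (fun p => p.1 == x.1) = [] →
    PySem.List.insertBy (fun a b => decide ((fun p : Int × Int => p.1) a < (fun p : Int × Int => p.1) b)) x
        (K.flatMap (fun j => ps.filter (fun p => p.1 == j)))
      = (PySem.List.insertBy (fun a b => decide ((fun x : Int => x) a < (fun x : Int => x) b)) x.1 K).flatMap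
          (fun j => (ps ++ [x]).filter (fun p => p.1 == j)) := by
  intro K
  induction K with
  | nil =>
    intro _ _ hF
    simp [PySem.List.insertBy, List.filter_append, hF]
  | cons j K ih =>
    intro hpw hnot hF
    have hj : ∀ j' ∈ K, j < j' := (List.pairwise_cons.mp hpw).1
    have hpw' : K.Pairwise (· < ·) := (List.pairwise_cons.mp hpw).2
    have hne : x.1 ≠ j := by intro h; exact hnot (by simp [h])
    have hnot' : x.1 ∉ K := fun h => hnot (by simp [h])
    by_cases hlt : x.1 < j
    · have hins : PySem.List.insertBy
          (fun a b => decide ((fun x : Int => x) a < (fun x : Int => x) b)) x.1 (j :: K)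
          = x.1 :: j :: K := by
        simp [PySem.List.insertBy, hlt]
      rw [hins]
      have h2 : ∀ y ∈ (j :: K).flatMap (fun j' => ps.filter (fun p => p.1 == j')),
          (fun a b : Int × Int => decide (a.1 < b.1)) x y = true := by
        intro y hy
        obtain ⟨j', hj', hyf⟩ := List.mem_flatMap.mp hy
        have hy1 : y.1 = j' := by simpa using (List.mem_filter.mp hyf).2
        simp only [decide_eq_true_eq, hy1]
        rcases List.mem_cons.mp hj' with h | h
        · omega
        · have := hj _ h; omega
      rw [pv_insertBy_all_true _ _ _ h2]
      have e1 : (ps ++ [x]).filter (fun p => p.1 == x.1) = [x] := by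
        simp [List.filter_append, hF]
      have e2 : (ps ++ [x]).filter (fun p => p.1 == j) = ps.filter (fun p => p.1 == j) := by
        simp [List.filter_append, hne]
      have e3 : K.flatMap (fun j' => (ps ++ [x]).filter (fun p => p.1 == j'))
          = K.flatMap (fun j' => ps.filter (fun p => p.1 == j')) := by
        apply List.flatMap_congr
        intro j' hj'
        have hne' : x.1 ≠ j' := fun hx => hnot' (hx ▸ hj')
        simp [List.filter_append, hne']
      simp only [List.flatMap_cons, e1, e2, e3]
      simp
    · have hgt : j < x.1 := by omega
      have hins : PySem.List.insertBy
          (fun a b => decide ((fun x : Int => x) a < (fun x : Int => x) b)) x.1 (j :: K)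
          = j :: PySem.List.insertBy (fun a b => decide ((fun x : Int => x) a < (fun x : Int => x) b)) x.1 K := by
        simp [PySem.List.insertBy, hlt]
      rw [hins]
      simp only [List.flatMap_cons]
      have h1 : ∀ y ∈ ps.filter (fun p => p.1 == j),
          (fun a b : Int × Int => decide (a.1 < b.1)) x y = false := by
        intro y hy
        have : y.1 = j := by simpa using (List.mem_filter.mp hy).2
        simp [this]; omega
      rw [pv_insertBy_append_left _ _ _ _ h1, ih hpw' hnot' hF]
      have : (ps ++ [x]).filter (fun p => p.1 == j) = ps.filter (fun p => p.1 == j) := by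
        simp [List.filter_append, hne]
      rw [this]

-- STABILITY: Python's stable sort on the key equals concatenating, over the sorted
-- distinct keys, the pairs with that key in original order.
theorem pv_stable (ps : List (Int × Int)) :
    PySem.List.sorted ps (fun p => p.1) false
      = (PySem.List.sorted (PySem.Set.ofList (ps.map (fun p => p.1))) (fun x => x) false).flatMap
          (fun j => ps.filter (fun p => p.1 == j)) := by
  induction ps using List.reverseRecOn with
  | nil => rfl
  | append_singleton ps x ih =>
    rw [pv_sorted_snoc, ih]
    have hpw : (PySem.List.sorted (PySem.Set.ofList (ps.map (fun p => p.1))) (fun x => x) false).Pairwise (· < ·) :=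
      PySem.List.sorted_ofList_pairwise_lt _
    rw [show (ps ++ [x]).map (fun p : Int × Int => p.1) = ps.map (fun p => p.1) ++ [x.1] by simp]
    rw [pv_ofList_snoc]
    by_cases hc : x.1 ∈ ps.map (fun p : Int × Int => p.1)
    · have hc1 : x.1 ∈ PySem.Set.ofList (ps.map (fun p : Int × Int => p.1)) :=
        (PySem.Set.mem_ofList _ _).mpr hc
      have hcontains : PySem.Set.contains (PySem.Set.ofList (ps.map (fun p : Int × Int => p.1))) x.1 = true := by
        unfold PySem.Set.contains
        exact List.contains_iff_mem.mpr hc1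
      rw [show PySem.Set.add (PySem.Set.ofList (ps.map (fun p : Int × Int => p.1))) x.1
            = PySem.Set.ofList (ps.map (fun p : Int × Int => p.1)) by
        unfold PySem.Set.add; rw [hcontains]; simp]
      apply pv_insA
      · exact hpw
      · rw [PySem.List.mem_sorted]
        exact hc1
    · have hc1 : x.1 ∉ PySem.Set.ofList (ps.map (fun p : Int × Int => p.1)) :=
        fun h => hc ((PySem.Set.mem_ofList _ _).mp h)
      have hcontains : PySem.Set.contains (PySem.Set.ofList (ps.map (fun p : Int × Int => p.1))) x.1 = false := by
        unfold PySem.Set.contains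
        exact Bool.eq_false_iff.mpr (fun h => hc1 (List.contains_iff_mem.mp h))
      rw [show PySem.Set.add (PySem.Set.ofList (ps.map (fun p : Int × Int => p.1))) x.1
            = PySem.Set.ofList (ps.map (fun p : Int × Int => p.1)) ++ [x.1] by
        unfold PySem.Set.add; rw [hcontains]; simp]
      rw [pv_sorted_snoc]
      apply pv_insB
      · exact hpw
      · rw [PySem.List.mem_sorted]
        exact hc1
      · rw [List.filter_eq_nil_iff]
        intro p hp h
        exact hc (List.mem_map.mpr ⟨p, hp, by simpa using h⟩)

-- the grouping dict's keys are the distinct keys in first-occurrence order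
theorem pv_get?_none_iff (d : PySem.Dict Int (List Int)) (k : Int) :
    d.get? k = none ↔ k ∉ d.keys := by
  simp only [PySem.Dict.get?, PySem.Dict.keys, Option.map_eq_none_iff, List.find?_eq_none,
    List.mem_map]
  constructor
  · rintro h ⟨p, hp, rfl⟩; exact h p hp (by simp)
  · intro h p hp; by_contra hb
    exact h ⟨p, hp, by simpa using hb⟩

theorem pv_keys_insert_of_mem (d : PySem.Dict Int (List Int)) (k : Int) (v : List Int)
    (h : k ∈ d.keys) : (d.insert k v).keys = d.keys := by
  have hcont : d.contains k = true := by
    simp only [PySem.Dict.contains]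
    obtain ⟨p, hp, rfl⟩ := List.mem_map.mp h
    exact List.any_eq_true.mpr ⟨p, hp, by simp⟩
  simp only [PySem.Dict.insert, hcont, if_true, PySem.Dict.keys, List.map_map]
  apply List.map_congr_left
  intro p _
  by_cases hpk : p.1 = k
  · simp [hpk]
  · simp [hpk]

theorem pv_keys_insert_of_not_mem (d : PySem.Dict Int (List Int)) (k : Int) (v : List Int)
    (h : k ∉ d.keys) : (d.insert k v).keys = d.keys ++ [k] := by
  have hcont : d.contains k = false := by
    simp only [PySem.Dict.contains, List.any_eq_false]
    intro p hp
    simp only [beq_iff_eq]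
    intro hpk
    exact h (List.mem_map.mpr ⟨p, hp, hpk⟩)
  simp [PySem.Dict.insert, hcont, PySem.Dict.keys]

theorem pv_group_keys (ps : List (Int × Int)) :
    (pvGroup ps).keys = PySem.Set.ofList (ps.map (fun p => p.1)) := by
  induction ps using List.reverseRecOn with
  | nil => rfl
  | append_singleton ps x ih =>
    have hstep : pvGroup (ps ++ [x]) = pvStep (pvGroup ps) x := by
      simp [pvGroup, List.foldl_append]
    rw [hstep, show (ps ++ [x]).map (fun p : Int × Int => p.1) = ps.map (fun p => p.1) ++ [x.1] by simp,
      pv_ofList_snoc, ← ih]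
    unfold pvStep
    cases hg : (pvGroup ps).get? x.1 with
    | none =>
      have hmem : x.1 ∉ (pvGroup ps).keys := (pv_get?_none_iff _ _).mp hg
      rw [pv_keys_insert_of_not_mem _ _ _ hmem]
      have hcont : (PySem.Set.contains ((pvGroup ps).keys) x.1) = false := by
        unfold PySem.Set.contains
        exact Bool.eq_false_iff.mpr (fun h => hmem (List.contains_iff_mem.mp h))
      unfold PySem.Set.add; rw [hcont]; simp
    | some v =>
      have hmem : x.1 ∈ (pvGroup ps).keys := by
        by_contra h
        rw [(pv_get?_none_iff _ _).mpr h] at hg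
        simp at hg
      rw [pv_keys_insert_of_mem _ _ _ hmem]
      have hcont : (PySem.Set.contains ((pvGroup ps).keys) x.1) = true := by
        unfold PySem.Set.contains
        exact List.contains_iff_mem.mpr hmem
      unfold PySem.Set.add; rw [hcont]; simp

-- the grouping dict's value at key j is the j-keyed values in original order
theorem pv_group_getD (ps : List (Int × Int)) (j : Int) :
    (pvGroup ps).getD j [] = (ps.filter (fun p => p.1 == j)).map (fun p => p.2) := by
  induction ps using List.reverseRecOn with
  | nil => rfl
  | append_singleton ps x ih =>
    have hstep : pvGroup (ps ++ [x]) = pvStep (pvGroup ps) x := by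
      simp [pvGroup, List.foldl_append]
    rw [hstep, List.filter_append]
    unfold pvStep
    by_cases hxj : x.1 = j
    · cases hg : (pvGroup ps).get? x.1 with
      | none =>
        have hold : (ps.filter (fun p => p.1 == j)).map (fun p : Int × Int => p.2) = [] := by
          rw [← ih]
          simp [PySem.Dict.getD, hxj ▸ hg]
        simp [PySem.Dict.getD, hxj, PySem.Dict.get?_insert_self, hold]
      | some v =>
        have hold : (ps.filter (fun p => p.1 == j)).map (fun p : Int × Int => p.2) = v := by
          rw [← ih]
          simp [PySem.Dict.getD, hxj ▸ hg]
        simp [PySem.Dict.getD, hxj, PySem.Dict.get?_insert_self, hold]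
    · have hget : ∀ w : List Int, ((pvGroup ps).insert x.1 w).get? j = (pvGroup ps).get? j :=
        fun w => PySem.Dict.get?_insert_of_ne _ _ (Ne.symm hxj)
      cases hg : (pvGroup ps).get? x.1 with
      | none => simpa [PySem.Dict.getD, hget, hxj] using ih
      | some v => simpa [PySem.Dict.getD, hget, hxj] using ih

-- A's output-building loop over the dict equals B's stable sort, for ANY pair list
theorem pv_main (ps : List (Int × Int)) :
    (PySem.List.sorted (pvGroup ps).keys (fun x => x) false).foldl
        (fun acc j => acc ++ (pvGroup ps).getD j []) []
      = (PySem.List.sorted ps (fun p => p.1) false).map (fun p => p.2) := by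
  rw [PySem.List.foldl_append_eq_flatMap, pv_group_keys, pv_stable, List.map_flatMap]
  simp only [pv_group_getD, List.nil_append]

-- ===== VERDICT (by name: the statement is the Claim_ definition above) =====
theorem sort_by_another___py_spec : Claim_equal_sort_by_another___py := by
  intro list1 list2 _ _
  unfold Spec_sort_by_another___py
  show sort_by_another___py list1 list2 = sort_by_another___py_alt list1 list2
  unfold sort_by_another___py sort_by_another___py_alt
  rw [← pv_main ((PySem.List.pyRange 0 (list1.length : Int)).map
      (fun i => (PySem.List.pyGetD list1 i 0, PySem.List.pyGetD list2 i 0)))]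
  unfold pvGroup
  rw [List.foldl_map]
  rfl
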